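-- pv_equiv track=rewrite | github.com/hugomontan/newave_agent | decomp_agent/app/tools/limites_intercambio_tool.py | _sugerir_pares_similares
-- ===== SOURCE A (Python) =====
-- from typing import Dict, Any, Optional, List
--
-- def _sugerir_pares_similares(sub_de: str, sub_para: str, pares: List[str]) -> List[str]:
--     """
--     Sugere pares similares quando o par solicitado não existe.
--     Prioriza pares que são similares em ambos os sentidos, depois parcialmente similares.
--     """
--     sugestoes_ambos = []  # Pares similares em ambos (origem E destino)
--     sugestoes_parcial = []  # Pares similares em apenas um (origem OU destino)
--
--     sub_de_upper = sub_de.upper().strip()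
--     sub_para_upper = sub_para.upper().strip()
--
--     for par in pares:
--         # Extrair DE e PARA do par (formato: "DE -> PARA")
--         parts = par.split(" -> ")
--         if len(parts) != 2:
--             continue
--
--         par_de = parts[0].strip().upper()
--         par_para = parts[1].strip().upper()
--
--         # Verificar similaridade na origem
--         similar_de = False
--         if sub_de_upper:
--             # Match exato ou substring
--             if sub_de_upper == par_de or sub_de_upper in par_de or par_de in sub_de_upper:
--                 similar_de = True
--             # Começa com a mesma letra (para casos como "S" -> "SE" ou "SUL")
--             elif len(sub_de_upper) >= 1 and par_de.startswith(sub_de_upper[0]):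
--                 similar_de = True
--
--         # Verificar similaridade no destino
--         similar_para = False
--         if sub_para_upper:
--             # Match exato ou substring
--             if sub_para_upper == par_para or sub_para_upper in par_para or par_para in sub_para_upper:
--                 similar_para = True
--             # Começa com a mesma letra
--             elif len(sub_para_upper) >= 1 and par_para.startswith(sub_para_upper[0]):
--                 similar_para = True
--
--         # Prioridade 1: Ambos similares
--         if similar_de and similar_para:
--             sugestoes_ambos.append(par)
--         # Prioridade 2: Apenas origem ou apenas destino similar
--         elif similar_de or similar_para:
--             sugestoes_parcial.append(par)
--
--     # Combinar: primeiro ambos, depois parciais (até 3 no total)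
--     todas_sugestoes = sugestoes_ambos + sugestoes_parcial
--     return todas_sugestoes[:3]
-- ===== SOURCE B (Python) =====
-- def _sugerir_pares_similares(sub_de, sub_para, pares):
--     q_de = sub_de.upper().strip()
--     q_para = sub_para.upper().strip()
--
--     def _similar(q, t):
--         return bool(q) and (q in t or t in q or t.startswith(q[0]))
--
--     def _score(par):
--         parts = par.split(" -> ")
--         if len(parts) != 2:
--             return None
--         de = parts[0].strip().upper()
--         para = parts[1].strip().upper()
--         p = int(_similar(q_de, de)) + int(_similar(q_para, para))
--         return (p, par) if p else None
--
--     cands = [c for c in map(_score, pares) if c is not None]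
--     cands.sort(key=lambda c: -c[0])  # stable: both-sides matches first, input order kept
--     return [par for _, par in cands[:3]]
-- ===== Notes on version B (the rewrite author's own statement) =====
-- stated objective: alternative
-- what changed: A maintains two priority buckets inside the loop and concatenates them; B scores each pair once with a helper returning an optional (priority, pair), then gets the priority order from a single stable sort on -priority and takes the first 3.
import Mathlib
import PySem

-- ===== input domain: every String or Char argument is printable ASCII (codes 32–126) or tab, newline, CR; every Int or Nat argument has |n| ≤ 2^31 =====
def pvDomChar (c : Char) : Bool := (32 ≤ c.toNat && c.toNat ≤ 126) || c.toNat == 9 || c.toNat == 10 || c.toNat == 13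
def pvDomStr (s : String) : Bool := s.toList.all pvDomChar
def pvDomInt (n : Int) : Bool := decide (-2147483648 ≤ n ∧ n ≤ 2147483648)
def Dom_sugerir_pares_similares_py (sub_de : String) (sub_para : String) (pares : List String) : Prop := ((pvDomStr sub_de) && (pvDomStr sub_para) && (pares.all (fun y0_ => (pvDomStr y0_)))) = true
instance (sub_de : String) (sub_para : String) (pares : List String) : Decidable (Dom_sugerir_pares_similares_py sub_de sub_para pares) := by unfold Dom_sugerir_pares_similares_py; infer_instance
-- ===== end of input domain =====

-- B replaces A's two manually maintained priority buckets by scoring each pair once and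
-- letting a stable sort on the score produce the priority order (objective: alternative decomposition).

-- ===== PORT A =====
-- literal transliteration of _sugerir_pares_similares: a fold carrying the two suggestion
-- lists (sugestoes_ambos, sugestoes_parcial), then (ambos ++ parcial)[:3]
def sugerir_pares_similares_py (sub_de : String) (sub_para : String) (pares : List String) : List String :=
  let sub_de_upper := PySem.Str.strip (PySem.Str.upper sub_de)
  let sub_para_upper := PySem.Str.strip (PySem.Str.upper sub_para)
  let st := pares.foldl (fun (acc : List String × List String) par =>
    let parts := (PySem.Str.split? par " -> ").getD []   -- sep is the literal " -> " ≠ "", so split? is some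
    if parts.length ≠ 2 then acc
    else
      let par_de := PySem.Str.upper (PySem.Str.strip (parts.getD 0 ""))
      let par_para := PySem.Str.upper (PySem.Str.strip (parts.getD 1 ""))
      let similar_de :=
        if sub_de_upper ≠ "" then
          if (sub_de_upper == par_de) || PySem.Str.isIn sub_de_upper par_de || PySem.Str.isIn par_de sub_de_upper then
            true
          else if (1 ≤ PySem.Str.len sub_de_upper) &&
              (match PySem.Str.pyGet? sub_de_upper 0 with   -- sub_de_upper[0], guarded by the len test
               | some c => PySem.Str.startswith par_de (String.ofList [c])
               | none => false) then
            true
          else false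
        else false
      let similar_para :=
        if sub_para_upper ≠ "" then
          if (sub_para_upper == par_para) || PySem.Str.isIn sub_para_upper par_para || PySem.Str.isIn par_para sub_para_upper then
            true
          else if (1 ≤ PySem.Str.len sub_para_upper) &&
              (match PySem.Str.pyGet? sub_para_upper 0 with
               | some c => PySem.Str.startswith par_para (String.ofList [c])
               | none => false) then
            true
          else false
        else false
      if similar_de && similar_para then (acc.1 ++ [par], acc.2)
      else if similar_de || similar_para then (acc.1, acc.2 ++ [par])
      else acc) ([], [])
  PySem.List.slice (st.1 ++ st.2) none (some 3)

-- ===== PORT B =====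
-- B's _similar helper
def pvSimilar (q t : String) : Bool :=
  decide (q ≠ "") &&
    (PySem.Str.isIn q t || PySem.Str.isIn t q ||
      (match PySem.Str.pyGet? q 0 with     -- q[0]; q is nonempty when this is reached
       | some c => PySem.Str.startswith t (String.ofList [c])
       | none => false))

-- B's _score helper: None for malformed / unrelated pairs, otherwise (priority, pair)
def pvScore (q_de : String) (q_para : String) (par : String) : Option (Int × String) :=
  let parts := (PySem.Str.split? par " -> ").getD []
  if parts.length ≠ 2 then none
  else
    let de := PySem.Str.upper (PySem.Str.strip (parts.getD 0 ""))
    let pa := PySem.Str.upper (PySem.Str.strip (parts.getD 1 ""))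
    let p : Int := (if pvSimilar q_de de then 1 else 0) + (if pvSimilar q_para pa then 1 else 0)
    if p ≠ 0 then some (p, par) else none

def sugerir_pares_similares_py_alt (sub_de : String) (sub_para : String) (pares : List String) : List String :=
  let q_de := PySem.Str.strip (PySem.Str.upper sub_de)
  let q_para := PySem.Str.strip (PySem.Str.upper sub_para)
  let cands := (pares.map (pvScore q_de q_para)).filterMap id
  let sortedC := PySem.List.sorted cands (fun c => -c.1)   -- stable sort, key = -priority
  (PySem.List.slice sortedC none (some 3)).map Prod.snd

-- ===== PRECONDITION & SPEC =====
def Spec_sugerir_pares_similares_py (sub_de : String) (sub_para : String) (pares : List String) (out : List String) : Prop := out = sugerir_pares_similares_py_alt sub_de sub_para pares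
instance (sub_de : String) (sub_para : String) (pares : List String) (out : List String) : Decidable (Spec_sugerir_pares_similares_py sub_de sub_para pares out) := by unfold Spec_sugerir_pares_similares_py; infer_instance

-- ===== CLAIM (what is proved, stated in full; the proofs are below) =====
def Claim_equal_sugerir_pares_similares_py : Prop := ∀ (sub_de : String) (sub_para : String) (pares : List String), Dom_sugerir_pares_similares_py sub_de sub_para pares → Spec_sugerir_pares_similares_py sub_de sub_para pares (sugerir_pares_similares_py sub_de sub_para pares)

-- ===== LEMMAS AND PROOFS =====

-- A's similarity cascade computes exactly B's pvSimilar (q == t is subsumed by `q in t`)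
lemma sim_eq (q t : String) :
    (if q ≠ "" then
      if (q == t) || PySem.Str.isIn q t || PySem.Str.isIn t q then
        true
      else if (1 ≤ PySem.Str.len q) &&
          (match PySem.Str.pyGet? q 0 with
           | some c => PySem.Str.startswith t (String.ofList [c])
           | none => false) then
        true
      else false
    else false) = pvSimilar q t := by
  by_cases hq : q = ""
  · simp [pvSimilar, hq]
  · have hnil : q.toList ≠ [] := by
      intro h; apply hq
      have := congrArg String.ofList h
      simpa using this
    have hlen : 1 ≤ PySem.Str.len q := by
      have : 0 < q.toList.length := List.length_pos_iff.mpr hnil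
      simp only [PySem.Str.len, PySem.Chars.len]
      omega
    by_cases het : q = t
    · subst het
      have hii : PySem.Chars.isIn q.toList q.toList = true := by
        rw [PySem.Chars.isIn_iff_infix]
      simp [pvSimilar, hq, hii]
    · have hbe : (q == t) = false := by simp [het]
      simp only [pvSimilar, hq, hbe, hlen, ne_eq, not_false_iff, Bool.false_or, decide_true,
        Bool.true_and, if_pos]
      cases hA : PySem.Str.isIn q t <;> cases hB : PySem.Str.isIn t q <;>
        simp [hA, hB] <;>
        (cases hm : (match PySem.Str.pyGet? q 0 with
           | some c => PySem.Str.startswith t (String.ofList [c])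
           | none => false) <;> simp [hm])

-- inserting x into a block of not-before elements followed by a block of before elements
lemma insert_two_blocks {α : Type} (key : α → Int) (x : α) (A B : List α)
    (hA : ∀ y ∈ A, ¬ key x < key y) (hB : ∀ y ∈ B, key x < key y) :
    PySem.List.insertBy (fun u v => decide (key u < key v)) x (A ++ B) = A ++ x :: B := by
  induction A with
  | nil =>
    cases B with
    | nil => simp [PySem.List.insertBy]
    | cons b bs => simp [PySem.List.insertBy, hB b (by simp)]
  | cons a as ih =>
    have h1 : ¬ key x < key a := hA a (by simp)
    simp [PySem.List.insertBy, h1]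
    exact ih (fun y hy => hA y (by simp [hy]))

-- a stable sort of a list whose keys take only the two values a < b is
-- "the a-block, then the b-block", each in original order
lemma sorted_two_valued {α : Type} (key : α → Int) (a b : Int) (hab : a < b) (xs : List α)
    (hx : ∀ c ∈ xs, key c = a ∨ key c = b) :
    PySem.List.sorted xs key =
      xs.filter (fun c => key c == a) ++ xs.filter (fun c => key c == b) := by
  rw [PySem.List.sorted_eq_foldl_insertBy]
  suffices h : ∀ (A B : List α), (∀ y ∈ A, key y = a) → (∀ y ∈ B, key y = b) →
      xs.foldl (fun acc x => PySem.List.insertBy (fun u v => decide (key u < key v)) x acc) (A ++ B)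
      = (A ++ xs.filter (fun c => key c == a)) ++ (B ++ xs.filter (fun c => key c == b)) by
    simpa using h [] [] (by simp) (by simp)
  induction xs with
  | nil => intro A B _ _; simp
  | cons x t ih =>
    intro A B hA hB
    have hxt : ∀ c ∈ t, key c = a ∨ key c = b := fun c hc => hx c (by simp [hc])
    rcases hx x (by simp) with h | h
    · rw [List.foldl_cons,
        insert_two_blocks key x A B (fun y hy => by rw [hA y hy, h]; omega)
          (fun y hy => by rw [hB y hy, h]; omega)]
      have := ih hxt (A ++ [x]) B
        (by intro y hy; rcases List.mem_append.mp hy with h' | h'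
            · exact hA y h'
            · simp at h'; subst h'; exact h) hB
      simp only [List.append_assoc, List.cons_append, List.nil_append] at this ⊢
      rw [this]
      simp [List.filter_cons, h, hab, Int.ne_of_lt hab]
    · rw [List.foldl_cons,
        PySem.List.insertBy_of_forall_not_before _ _ _
          (by intro y hy
              rcases List.mem_append.mp hy with h' | h'
              · simp [hA y h', h]; omega
              · simp [hB y h', h])]
      have := ih hxt A (B ++ [x]) hA
        (by intro y hy; rcases List.mem_append.mp hy with h' | h'
            · exact hB y h'
            · simp at h'; subst h'; exact h)
      simp only [List.append_assoc, List.cons_append, List.nil_append] at this ⊢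
      rw [this]
      simp [List.filter_cons, h, hab, (Int.ne_of_lt hab).symm]

-- shape of pvScore's result
lemma pvScore_some {q1 q2 par : String} {c : Int × String}
    (h : pvScore q1 q2 par = some c) : c.2 = par ∧ (c.1 = 1 ∨ c.1 = 2) := by
  unfold pvScore at h
  simp only at h
  split at h
  · exact absurd h (by simp)
  · split_ifs at h <;> (try cases h) <;> simp_all

-- proof-side name for B's classification step acting on A's pair of buckets
def pvStep (qd qp : String) (acc : List String × List String) (par : String) :
    List String × List String :=
  match pvScore qd qp par with
  | none => acc
  | some c => if c.1 == 2 then (acc.1 ++ [par], acc.2) else (acc.1, acc.2 ++ [par])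

-- A's loop body, phrased through B's pvScore
lemma stepA_score (qd qp : String) (acc : List String × List String) (par : String) :
    (let parts := (PySem.Str.split? par " -> ").getD []
     if parts.length ≠ 2 then acc
     else
      let par_de := PySem.Str.upper (PySem.Str.strip (parts.getD 0 ""))
      let par_para := PySem.Str.upper (PySem.Str.strip (parts.getD 1 ""))
      let similar_de :=
        if qd ≠ "" then
          if (qd == par_de) || PySem.Str.isIn qd par_de || PySem.Str.isIn par_de qd then true
          else if (1 ≤ PySem.Str.len qd) &&
              (match PySem.Str.pyGet? qd 0 with
               | some c => PySem.Str.startswith par_de (String.ofList [c])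
               | none => false) then true
          else false
        else false
      let similar_para :=
        if qp ≠ "" then
          if (qp == par_para) || PySem.Str.isIn qp par_para || PySem.Str.isIn par_para qp then true
          else if (1 ≤ PySem.Str.len qp) &&
              (match PySem.Str.pyGet? qp 0 with
               | some c => PySem.Str.startswith par_para (String.ofList [c])
               | none => false) then true
          else false
        else false
      if similar_de && similar_para then (acc.1 ++ [par], acc.2)
      else if similar_de || similar_para then (acc.1, acc.2 ++ [par])
      else acc) = pvStep qd qp acc par := by
  unfold pvStep
  simp only [sim_eq]
  by_cases hl : ((PySem.Str.split? par " -> ").getD []).length ≠ 2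
  · simp [pvScore, hl]
  · cases h1 : pvSimilar qd (PySem.Str.upper (PySem.Str.strip ((((PySem.Str.split? par " -> ").getD [])[0]?).getD ""))) <;>
    cases h2 : pvSimilar qp (PySem.Str.upper (PySem.Str.strip ((((PySem.Str.split? par " -> ").getD [])[1]?).getD ""))) <;>
    norm_num [pvScore, hl, h1, h2]

-- A's whole loop, as appends to the two buckets, through pvScore
lemma foldA (qd qp : String) (pares : List String) :
    ∀ u v : List String,
    pares.foldl (fun (acc : List String × List String) par =>
      let parts := (PySem.Str.split? par " -> ").getD []
      if parts.length ≠ 2 then acc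
      else
        let par_de := PySem.Str.upper (PySem.Str.strip (parts.getD 0 ""))
        let par_para := PySem.Str.upper (PySem.Str.strip (parts.getD 1 ""))
        let similar_de :=
          if qd ≠ "" then
            if (qd == par_de) || PySem.Str.isIn qd par_de || PySem.Str.isIn par_de qd then true
            else if (1 ≤ PySem.Str.len qd) &&
                (match PySem.Str.pyGet? qd 0 with
                 | some c => PySem.Str.startswith par_de (String.ofList [c])
                 | none => false) then true
            else false
          else false
        let similar_para :=
          if qp ≠ "" then
            if (qp == par_para) || PySem.Str.isIn qp par_para || PySem.Str.isIn par_para qp then true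
            else if (1 ≤ PySem.Str.len qp) &&
                (match PySem.Str.pyGet? qp 0 with
                 | some c => PySem.Str.startswith par_para (String.ofList [c])
                 | none => false) then true
            else false
          else false
        if similar_de && similar_para then (acc.1 ++ [par], acc.2)
        else if similar_de || similar_para then (acc.1, acc.2 ++ [par])
        else acc) (u, v) =
    (u ++ ((pares.filterMap (pvScore qd qp)).filter (fun c => c.1 == 2)).map Prod.snd,
     v ++ ((pares.filterMap (pvScore qd qp)).filter (fun c => c.1 == 1)).map Prod.snd) := by
  induction pares with
  | nil => intro u v; simp
  | cons x t ih =>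
    intro u v
    rw [List.foldl_cons]
    beta_reduce
    rw [stepA_score qd qp (u, v) x]
    rcases hsc : pvScore qd qp x with _ | c
    · rw [show pvStep qd qp (u, v) x = (u, v) from by simp [pvStep, hsc], ih u v]
      simp [List.filterMap_cons, hsc]
    · obtain ⟨h2, h1⟩ := pvScore_some hsc
      rcases h1 with h1 | h1
      · rw [show pvStep qd qp (u, v) x = (u, v ++ [x]) from by simp [pvStep, hsc, h1],
          ih u (v ++ [x])]
        simp [List.filterMap_cons, hsc, List.filter_cons, h1, h2]
      · rw [show pvStep qd qp (u, v) x = (u ++ [x], v) from by simp [pvStep, hsc, h1],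
          ih (u ++ [x]) v]
        simp [List.filterMap_cons, hsc, List.filter_cons, h1, h2]

-- the two filter predicates of sorted_two_valued, in terms of the priority itself
lemma negkey_filter (xs : List (Int × String)) (p : Int) :
    xs.filter (fun c => (-c.1) == (-p)) = xs.filter (fun c => c.1 == p) := by
  apply List.filter_congr
  intro c _
  by_cases h : c.1 = p
  · simp [h]
  · have h' : ¬ (-c.1 = -p) := by omega
    simp [h, h']

-- ===== VERDICT (by name: the statement is the Claim_ definition above) =====
theorem sugerir_pares_similares_py_spec : Claim_equal_sugerir_pares_similares_py := by
  intro sub_de sub_para pares _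
  unfold Spec_sugerir_pares_similares_py
  have hA := foldA (PySem.Str.strip (PySem.Str.upper sub_de))
    (PySem.Str.strip (PySem.Str.upper sub_para)) pares [] []
  have h1 : sugerir_pares_similares_py sub_de sub_para pares =
      PySem.List.slice
        (([] ++ ((pares.filterMap (pvScore (PySem.Str.strip (PySem.Str.upper sub_de))
              (PySem.Str.strip (PySem.Str.upper sub_para)))).filter
              (fun c => c.1 == 2)).map Prod.snd) ++
         ([] ++ ((pares.filterMap (pvScore (PySem.Str.strip (PySem.Str.upper sub_de))
              (PySem.Str.strip (PySem.Str.upper sub_para)))).filter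
              (fun c => c.1 == 1)).map Prod.snd)) none (some 3) :=
    congrArg (fun st : List String × List String =>
      PySem.List.slice (st.1 ++ st.2) none (some 3)) hA
  rw [h1]
  unfold sugerir_pares_similares_py_alt
  simp only [List.filterMap_map, Function.id_comp]
  set qd := PySem.Str.strip (PySem.Str.upper sub_de) with hqd
  set qp := PySem.Str.strip (PySem.Str.upper sub_para) with hqp
  set cands := pares.filterMap (pvScore qd qp) with hcands
  have hx : ∀ c ∈ cands, (fun c : Int × String => -c.1) c = -2 ∨ (fun c : Int × String => -c.1) c = -1 := by
    intro c hc
    rw [hcands, List.mem_filterMap] at hc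
    obtain ⟨x, _, hsc⟩ := hc
    rcases (pvScore_some hsc).2 with h | h <;> simp [h]
  rw [sorted_two_valued (fun c : Int × String => -c.1) (-2) (-1) (by omega) cands hx]
  rw [negkey_filter cands 2, negkey_filter cands 1]
  rw [PySem.List.slice_to _ (by omega : (0:Int) ≤ 3),
      PySem.List.slice_to _ (by omega : (0:Int) ≤ 3)]
  simp [List.map_take]
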